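-- pv_equiv track=rewrite | github.com/yhwh371224/easygo | monitor/fred_monitor.py | prioritize_signals
-- ===== SOURCE A (Python) =====
-- def prioritize_signals(results):
--     priority = {}
--     for key, z in results.items():
--         if key.endswith("_3"):
--             p = 1
--         elif key.endswith("_5"):
--             p = 2
--         else:
--             p = 3
--         priority[key] = (p, z)
--     return dict(sorted(priority.items(), key=lambda x: (x[1][0], -abs(x[1][1]))))
-- ===== SOURCE B (Python) =====
-- def prioritize_signals(results):
--     tier1, tier2, tier3 = [], [], []
--     for key, z in results.items():
--         if key.endswith("_3"):
--             tier1.append((key, z))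
--         elif key.endswith("_5"):
--             tier2.append((key, z))
--         else:
--             tier3.append((key, z))
--     out = {}
--     for p, bucket in ((1, tier1), (2, tier2), (3, tier3)):
--         for key, z in sorted(bucket, key=lambda kv: -abs(kv[1])):
--             out[key] = (p, z)
--     return out
-- ===== Notes on version B (the rewrite author's own statement) =====
-- stated objective: alternative
-- what changed: Replaces the single global sort under the composite key (tier, -|z|) by a one-pass partition into three tier buckets followed by three independent stable sorts keyed only by -|z|, concatenated in tier order.
import Mathlib
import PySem

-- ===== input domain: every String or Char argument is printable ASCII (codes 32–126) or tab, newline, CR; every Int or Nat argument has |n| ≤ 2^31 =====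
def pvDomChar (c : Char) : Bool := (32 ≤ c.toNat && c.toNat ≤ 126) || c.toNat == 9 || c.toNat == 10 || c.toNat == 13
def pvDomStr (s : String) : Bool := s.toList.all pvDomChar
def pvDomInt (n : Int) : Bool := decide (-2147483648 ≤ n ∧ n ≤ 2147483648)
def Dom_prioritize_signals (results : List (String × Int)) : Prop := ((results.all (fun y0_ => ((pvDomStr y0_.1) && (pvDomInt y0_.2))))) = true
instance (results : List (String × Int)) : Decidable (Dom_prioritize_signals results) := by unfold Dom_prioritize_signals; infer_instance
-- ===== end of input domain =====

-- B replaces A's single composite-key sort by a partition into three tier buckets, three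
-- per-tier stable sorts on -|z| alone, and a concatenation (objective: alternative).

-- the 'results' parameter is a Python dict: both ports read it through the same
-- normalisation (duplicate keys collapse exactly as dict construction does, first
-- position, last value), so '.items' below is exactly results.items().
def pvDictify (results : List (String × Int)) : List (String × Int) :=
  (results.foldl (fun d kv => d.insert kv.1 kv.2) (PySem.Dict.empty : PySem.Dict String Int)).items

-- ===== PORT A =====
def prioritize_signals (results : List (String × Int)) : List (String × Int × Int) :=
  let priority := (pvDictify results).foldl (fun d kv =>
      d.insert kv.1 ((if PySem.Str.endswith kv.1 "_3" then (1 : Int)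
                      else if PySem.Str.endswith kv.1 "_5" then 2 else 3), kv.2))
      (PySem.Dict.empty : PySem.Dict String (Int × Int))
  let sortedItems := PySem.List.sorted2 priority.items (fun x => x.2.1) (fun x => -|x.2.2|)
  (sortedItems.foldl (fun d kv => d.insert kv.1 kv.2)
      (PySem.Dict.empty : PySem.Dict String (Int × Int))).items

-- ===== PORT B =====
def prioritize_signals_alt (results : List (String × Int)) : List (String × Int × Int) :=
  let buckets := (pvDictify results).foldl (fun acc kv =>
      if PySem.Str.endswith kv.1 "_3" then (acc.1 ++ [kv], acc.2.1, acc.2.2)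
      else if PySem.Str.endswith kv.1 "_5" then (acc.1, acc.2.1 ++ [kv], acc.2.2)
      else (acc.1, acc.2.1, acc.2.2 ++ [kv]))
      (([] : List (String × Int)), ([] : List (String × Int)), ([] : List (String × Int)))
  let out := [((1 : Int), buckets.1), (2, buckets.2.1), (3, buckets.2.2)].foldl
      (fun d pb => (PySem.List.sorted pb.2 (fun kv => -|kv.2|)).foldl
          (fun d kv => d.insert kv.1 (pb.1, kv.2)) d)
      (PySem.Dict.empty : PySem.Dict String (Int × Int))
  out.items

-- ===== PRECONDITION & SPEC =====
def Spec_prioritize_signals (results : List (String × Int)) (out : List (String × Int × Int)) : Prop := out = prioritize_signals_alt results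
instance (results : List (String × Int)) (out : List (String × Int × Int)) : Decidable (Spec_prioritize_signals results out) := by unfold Spec_prioritize_signals; infer_instance

-- ===== CLAIM (what is proved, stated in full; the proofs are below) =====
def Claim_equal_prioritize_signals : Prop := ∀ (results : List (String × Int)), Dom_prioritize_signals results → Spec_prioritize_signals results (prioritize_signals results)

-- ===== LEMMAS AND PROOFS =====

-- the tier of a key (A's 'p'; the bucket index in B)
def pvTier (k : String) : Int :=
  if PySem.Str.endswith k "_3" then 1 else if PySem.Str.endswith k "_5" then 2 else 3

lemma insertBy_cons {α : Type} (before : α → α → Bool) (x y : α) (ys : List α) :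
    PySem.List.insertBy before x (y :: ys) =
      if before x y then x :: y :: ys else y :: PySem.List.insertBy before x ys := rfl

-- insertBy steps over a prefix it never goes before, acts with an agreeing comparison
-- on the middle segment, and never passes the head of a suffix it always goes before.
lemma insertBy_split {α : Type} (before before' : α → α → Bool) (x : α) (p s r : List α)
    (hp : ∀ y ∈ p, before x y = false)
    (hs : ∀ y ∈ s, before x y = before' x y)
    (hr : ∀ y ∈ r, before x y = true) :
    PySem.List.insertBy before x (p ++ s ++ r) = p ++ PySem.List.insertBy before' x s ++ r := by
  induction p with
  | cons y ys ih =>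
    simp only [List.cons_append, insertBy_cons, hp y (by simp)]
    simp only [ih (fun z hz => hp z (by simp [hz])), Bool.false_eq_true, if_false]
  | nil =>
    induction s with
    | cons y ys ihs =>
      simp only [List.nil_append, List.cons_append, insertBy_cons, ← hs y (by simp)]
      rcases hb : before x y with _ | _
      · have h2 := ihs (fun z hz => hs z (by simp [hz])); simpa using h2
      · simp
    | nil =>
      cases r with
      | nil => rfl
      | cons z zs => simp [PySem.List.insertBy, insertBy_cons, hr z (by simp)]

lemma sorted2_append_singleton {α : Type} (l : List α) (x : α) (k1 k2 : α → Int) :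
    PySem.List.sorted2 (l ++ [x]) k1 k2 =
      PySem.List.insertBy
        (fun a b => decide (k1 a < k1 b) || (!decide (k1 b < k1 a) && decide (k2 a < k2 b)))
        x (PySem.List.sorted2 l k1 k2) := by
  simp [PySem.List.sorted2, List.foldl_append]

lemma sorted_append_singleton {α : Type} (l : List α) (x : α) (key : α → Int) :
    PySem.List.sorted (l ++ [x]) key =
      PySem.List.insertBy (fun a b => decide (key a < key b)) x (PySem.List.sorted l key) := by
  simp [PySem.List.sorted, List.foldl_append]

lemma map_insertBy {α β : Type} (before : α → α → Bool) (before' : β → β → Bool) (f : α → β)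
    (h : ∀ a b, before' (f a) (f b) = before a b) (x : α) (s : List α) :
    (PySem.List.insertBy before x s).map f = PySem.List.insertBy before' (f x) (s.map f) := by
  induction s with
  | nil => rfl
  | cons y ys ih =>
    show (if before x y then x :: y :: ys else y :: PySem.List.insertBy before x ys).map f = _
    rcases hb : before x y with _ | _ <;>
      simp [PySem.List.insertBy, h x y, hb, ih]

lemma sorted_map {α β : Type} (f : α → β) (key : α → Int) (key' : β → Int)
    (h : ∀ a, key' (f a) = key a) (l : List α) :
    (PySem.List.sorted l key).map f = PySem.List.sorted (l.map f) key' := by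
  induction l using List.reverseRecOn with
  | nil => rfl
  | append_singleton l x ih =>
    rw [sorted_append_singleton, List.map_append, List.map_singleton,
      sorted_append_singleton, ← ih,
      map_insertBy (fun a b => decide (key a < key b)) (fun a b => decide (key' a < key' b)) f
        (fun a b => by simp [h])]

-- the core identity: a stable sort under the composite key (tier, k2), when every tier
-- is 1, 2 or 3, is the concatenation of the three per-tier stable sorts under k2 alone.
lemma sorted2_eq_concat {α : Type} (k1 k2 : α → Int) (L : List α)
    (h : ∀ e ∈ L, k1 e = 1 ∨ k1 e = 2 ∨ k1 e = 3) :
    PySem.List.sorted2 L k1 k2 =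
      PySem.List.sorted (L.filter (fun e => decide (k1 e = 1))) k2 ++
      PySem.List.sorted (L.filter (fun e => decide (k1 e = 2))) k2 ++
      PySem.List.sorted (L.filter (fun e => decide (k1 e = 3))) k2 := by
  induction L using List.reverseRecOn with
  | nil => rfl
  | append_singleton L x ih =>
    have hL : ∀ e ∈ L, k1 e = 1 ∨ k1 e = 2 ∨ k1 e = 3 := fun e he => h e (by simp [he])
    have m1 : ∀ y ∈ PySem.List.sorted (L.filter (fun e => decide (k1 e = 1))) k2, k1 y = 1 := by
      intro y hy
      have hm := (PySem.List.mem_sorted (L.filter (fun e => decide (k1 e = 1))) (key := k2) (x := y) (rev := false)).1 hy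
      simpa using (List.mem_filter.1 hm).2
    have m2 : ∀ y ∈ PySem.List.sorted (L.filter (fun e => decide (k1 e = 2))) k2, k1 y = 2 := by
      intro y hy
      have hm := (PySem.List.mem_sorted (L.filter (fun e => decide (k1 e = 2))) (key := k2) (x := y) (rev := false)).1 hy
      simpa using (List.mem_filter.1 hm).2
    have m3 : ∀ y ∈ PySem.List.sorted (L.filter (fun e => decide (k1 e = 3))) k2, k1 y = 3 := by
      intro y hy
      have hm := (PySem.List.mem_sorted (L.filter (fun e => decide (k1 e = 3))) (key := k2) (x := y) (rev := false)).1 hy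
      simpa using (List.mem_filter.1 hm).2
    rw [sorted2_append_singleton, ih hL, List.filter_append, List.filter_append, List.filter_append]
    rcases h x (by simp) with hx | hx | hx
    · simp only [List.filter_singleton, hx]
      norm_num
      rw [sorted_append_singleton]
      have hsp := insertBy_split
        (fun a b => decide (k1 a < k1 b) || (!decide (k1 b < k1 a) && decide (k2 a < k2 b)))
        (fun a b => decide (k2 a < k2 b)) x []
        (PySem.List.sorted (L.filter (fun e => decide (k1 e = 1))) k2)
        (PySem.List.sorted (L.filter (fun e => decide (k1 e = 2))) k2 ++
         PySem.List.sorted (L.filter (fun e => decide (k1 e = 3))) k2)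
        (by simp)
        (by intro y hy; simp [hx, m1 y hy])
        (by intro y hy
            rcases List.mem_append.1 hy with hy | hy
            · simp [hx, m2 y hy]
            · simp [hx, m3 y hy])
      simpa using hsp
    · simp only [List.filter_singleton, hx]
      norm_num
      rw [sorted_append_singleton]
      have hsp := insertBy_split
        (fun a b => decide (k1 a < k1 b) || (!decide (k1 b < k1 a) && decide (k2 a < k2 b)))
        (fun a b => decide (k2 a < k2 b)) x
        (PySem.List.sorted (L.filter (fun e => decide (k1 e = 1))) k2)
        (PySem.List.sorted (L.filter (fun e => decide (k1 e = 2))) k2)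
        (PySem.List.sorted (L.filter (fun e => decide (k1 e = 3))) k2)
        (by intro y hy; simp [hx, m1 y hy])
        (by intro y hy; simp [hx, m2 y hy])
        (by intro y hy; simp [hx, m3 y hy])
      simpa using hsp
    · simp only [List.filter_singleton, hx]
      norm_num
      rw [sorted_append_singleton]
      have hsp := insertBy_split
        (fun a b => decide (k1 a < k1 b) || (!decide (k1 b < k1 a) && decide (k2 a < k2 b)))
        (fun a b => decide (k2 a < k2 b)) x
        (PySem.List.sorted (L.filter (fun e => decide (k1 e = 1))) k2 ++
         PySem.List.sorted (L.filter (fun e => decide (k1 e = 2))) k2)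
        (PySem.List.sorted (L.filter (fun e => decide (k1 e = 3))) k2)
        []
        (by intro y hy
            rcases List.mem_append.1 hy with hy | hy
            · simp [hx, m1 y hy]
            · simp [hx, m2 y hy])
        (by intro y hy; simp [hx, m3 y hy])
        (by simp)
      simpa [List.append_assoc] using hsp

-- B's partition loop is the three filters
lemma buckets_eq (l : List (String × Int)) (a b c : List (String × Int)) :
    l.foldl (fun acc kv =>
      if PySem.Str.endswith kv.1 "_3" then (acc.1 ++ [kv], acc.2.1, acc.2.2)
      else if PySem.Str.endswith kv.1 "_5" then (acc.1, acc.2.1 ++ [kv], acc.2.2)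
      else (acc.1, acc.2.1, acc.2.2 ++ [kv])) (a, b, c) =
    (a ++ l.filter (fun kv => decide (pvTier kv.1 = 1)),
     b ++ l.filter (fun kv => decide (pvTier kv.1 = 2)),
     c ++ l.filter (fun kv => decide (pvTier kv.1 = 3))) := by
  induction l generalizing a b c with
  | nil => simp
  | cons kv t ih =>
    rcases h3 : PySem.Str.endswith kv.1 "_3" with _ | _ <;>
      rcases h5 : PySem.Str.endswith kv.1 "_5" with _ | _
    · have e : pvTier kv.1 = 3 := by unfold pvTier; rw [h3, h5]; norm_num
      simp only [List.foldl_cons, h3, h5, Bool.false_eq_true, if_false]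
      rw [ih, List.filter_cons, List.filter_cons, List.filter_cons]
      simp [e, List.append_assoc]
    · have e : pvTier kv.1 = 2 := by unfold pvTier; rw [h3, h5]; norm_num
      simp only [List.foldl_cons, h3, h5, Bool.false_eq_true, if_false, if_true]
      rw [ih, List.filter_cons, List.filter_cons, List.filter_cons]
      simp [e, List.append_assoc]
    · have e : pvTier kv.1 = 1 := by unfold pvTier; rw [h3]; norm_num
      simp only [List.foldl_cons, h3, if_true]
      rw [ih, List.filter_cons, List.filter_cons, List.filter_cons]
      simp [e, List.append_assoc]
    · have e : pvTier kv.1 = 1 := by unfold pvTier; rw [h3]; norm_num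
      simp only [List.foldl_cons, h3, if_true]
      rw [ih, List.filter_cons, List.filter_cons, List.filter_cons]
      simp [e, List.append_assoc]

lemma pvDictify_nodup_keys (results : List (String × Int)) :
    ((pvDictify results).map (·.1)).Nodup := by
  have h := PySem.Dict.nodup_keys_foldl_insert_key results (fun kv => kv.1) (fun d kv => kv.2)
    (PySem.Dict.empty : PySem.Dict String Int) PySem.Dict.nodup_keys_empty
  simpa [pvDictify, PySem.Dict.keys] using h

lemma pvTier_cases (k : String) : pvTier k = 1 ∨ pvTier k = 2 ∨ pvTier k = 3 := by
  unfold pvTier; split_ifs <;> simp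

-- A is the composite-key stable sort of the tiered items
lemma A_eq (results : List (String × Int)) :
    prioritize_signals results =
      PySem.List.sorted2 ((pvDictify results).map (fun kv => (kv.1, pvTier kv.1, kv.2)))
        (fun x => x.2.1) (fun x => -|x.2.2|) := by
  have hnd := pvDictify_nodup_keys results
  have hpri := PySem.Dict.items_foldl_insert_fresh (pvDictify results) (fun kv => kv.1)
    (fun kv => (pvTier kv.1, kv.2)) (PySem.Dict.empty : PySem.Dict String (Int × Int))
    (fun a _ => PySem.Dict.contains_empty _) hnd
  have hndmap : (((pvDictify results).map (fun kv => (kv.1, pvTier kv.1, kv.2))).map (·.1)).Nodup := by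
    simpa [List.map_map, Function.comp] using hnd
  have hSperm := PySem.List.sorted2_perm
    ((pvDictify results).map (fun kv => (kv.1, pvTier kv.1, kv.2)))
    (fun x => x.2.1) (fun x => -|x.2.2|) false
  have hSnd : ((PySem.List.sorted2 ((pvDictify results).map (fun kv => (kv.1, pvTier kv.1, kv.2)))
      (fun x => x.2.1) (fun x => -|x.2.2|)).map (·.1)).Nodup :=
    ((hSperm.map (·.1)).nodup_iff).2 hndmap
  have hreb := PySem.Dict.items_foldl_insert_fresh
    (PySem.List.sorted2 ((pvDictify results).map (fun kv => (kv.1, pvTier kv.1, kv.2)))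
      (fun x => x.2.1) (fun x => -|x.2.2|))
    (fun kv => kv.1) (fun kv => kv.2) (PySem.Dict.empty : PySem.Dict String (Int × Int))
    (fun a _ => PySem.Dict.contains_empty _) hSnd
  simp only [prioritize_signals]
  rw [show ((pvDictify results).foldl (fun d kv =>
      d.insert kv.1 ((if PySem.Str.endswith kv.1 "_3" then (1 : Int)
                      else if PySem.Str.endswith kv.1 "_5" then 2 else 3), kv.2))
      (PySem.Dict.empty : PySem.Dict String (Int × Int))).items
      = (pvDictify results).map (fun kv => (kv.1, pvTier kv.1, kv.2)) from by
    simpa [pvTier] using hpri]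
  simpa using hreb

-- B is the concatenation of the per-tier stable sorts
lemma B_eq (results : List (String × Int)) :
    prioritize_signals_alt results =
      (PySem.List.sorted ((pvDictify results).filter (fun kv => decide (pvTier kv.1 = 1)))
        (fun kv => -|kv.2|)).map (fun kv => (kv.1, (1 : Int), kv.2)) ++
      (PySem.List.sorted ((pvDictify results).filter (fun kv => decide (pvTier kv.1 = 2)))
        (fun kv => -|kv.2|)).map (fun kv => (kv.1, (2 : Int), kv.2)) ++
      (PySem.List.sorted ((pvDictify results).filter (fun kv => decide (pvTier kv.1 = 3)))
        (fun kv => -|kv.2|)).map (fun kv => (kv.1, (3 : Int), kv.2)) := by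
  have hnd := pvDictify_nodup_keys results
  have memS : ∀ (i : Int) (kv : String × Int),
      kv ∈ PySem.List.sorted ((pvDictify results).filter (fun kv => decide (pvTier kv.1 = i)))
        (fun kv => -|kv.2|) → kv ∈ pvDictify results ∧ pvTier kv.1 = i := by
    intro i kv hkv
    have hm := (PySem.List.mem_sorted _ (key := fun kv : String × Int => -|kv.2|)
      (x := kv) (rev := false)).1 hkv
    exact ⟨(List.mem_filter.1 hm).1, by simpa using (List.mem_filter.1 hm).2⟩
  have ndS : ∀ (i : Int),
      ((PySem.List.sorted ((pvDictify results).filter (fun kv => decide (pvTier kv.1 = i)))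
        (fun kv => -|kv.2|)).map (·.1)).Nodup := by
    intro i
    have hperm := PySem.List.sorted_perm
      ((pvDictify results).filter (fun kv => decide (pvTier kv.1 = i))) (fun kv => -|kv.2|) false
    have hsub : (((pvDictify results).filter (fun kv => decide (pvTier kv.1 = i))).map
        (fun kv : String × Int => kv.1)).Sublist ((pvDictify results).map (fun kv : String × Int => kv.1)) :=
      List.Sublist.map _ List.filter_sublist
    exact ((hperm.map (·.1)).nodup_iff).2 (hsub.nodup hnd)
  have keydisj : ∀ (i j : Int), i ≠ j → ∀ kv kv' : String × Int,
      kv ∈ PySem.List.sorted ((pvDictify results).filter (fun kv => decide (pvTier kv.1 = i)))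
        (fun kv => -|kv.2|) →
      kv' ∈ PySem.List.sorted ((pvDictify results).filter (fun kv => decide (pvTier kv.1 = j)))
        (fun kv => -|kv.2|) → kv.1 ≠ kv'.1 := by
    intro i j hij kv kv' hkv hkv' heq
    obtain ⟨hkvI, hkvT⟩ := memS i kv hkv
    obtain ⟨hkvI', hkvT'⟩ := memS j kv' hkv'
    have : kv = kv' := List.inj_on_of_nodup_map hnd hkvI hkvI' heq
    exact hij (hkvT ▸ this ▸ hkvT')
  simp only [prioritize_signals_alt]
  rw [buckets_eq]
  simp only [List.nil_append, List.foldl_cons, List.foldl_nil]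
  have hempty : (PySem.Dict.empty : PySem.Dict String (Int × Int)).items = [] := rfl
  -- first fold: fresh keys into the empty dict
  have h1 := PySem.Dict.items_foldl_insert_fresh
    (PySem.List.sorted ((pvDictify results).filter (fun kv => decide (pvTier kv.1 = 1)))
      (fun kv => -|kv.2|))
    (fun kv => kv.1) (fun kv => ((1 : Int), kv.2))
    (PySem.Dict.empty : PySem.Dict String (Int × Int))
    (fun a _ => PySem.Dict.contains_empty _) (ndS 1)
  beta_reduce at h1
  rw [hempty, List.nil_append] at h1
  -- second fold: its keys are tier-2, disjoint from the tier-1 keys already present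
  have h2pre : ∀ kv ∈ PySem.List.sorted
      ((pvDictify results).filter (fun kv => decide (pvTier kv.1 = 2))) (fun kv => -|kv.2|),
      ((PySem.List.sorted ((pvDictify results).filter (fun kv => decide (pvTier kv.1 = 1)))
          (fun kv => -|kv.2|)).foldl (fun d kv => d.insert kv.1 ((1 : Int), kv.2))
        (PySem.Dict.empty : PySem.Dict String (Int × Int))).contains kv.1 = false := by
    intro kv hkv
    rcases hc : (_ : PySem.Dict String (Int × Int)).contains kv.1 with _ | _
    · rfl
    exfalso
    have hk := (PySem.Dict.contains_iff_mem_keys _ kv.1).1 hc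
    simp only [PySem.Dict.keys, h1, List.map_map] at hk
    obtain ⟨a, ha, ha1⟩ := List.mem_map.1 hk
    exact keydisj 1 2 (by norm_num) a kv ha hkv (by simpa using ha1)
  have h2 := PySem.Dict.items_foldl_insert_fresh
    (PySem.List.sorted ((pvDictify results).filter (fun kv => decide (pvTier kv.1 = 2)))
      (fun kv => -|kv.2|))
    (fun kv => kv.1) (fun kv => ((2 : Int), kv.2)) _ h2pre (ndS 2)
  beta_reduce at h2
  rw [h1] at h2
  -- third fold: tier-3 keys, disjoint from the tier-1 and tier-2 keys present
  have h3pre : ∀ kv ∈ PySem.List.sorted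
      ((pvDictify results).filter (fun kv => decide (pvTier kv.1 = 3))) (fun kv => -|kv.2|),
      ((PySem.List.sorted ((pvDictify results).filter (fun kv => decide (pvTier kv.1 = 2)))
          (fun kv => -|kv.2|)).foldl (fun d kv => d.insert kv.1 ((2 : Int), kv.2))
        ((PySem.List.sorted ((pvDictify results).filter (fun kv => decide (pvTier kv.1 = 1)))
            (fun kv => -|kv.2|)).foldl (fun d kv => d.insert kv.1 ((1 : Int), kv.2))
          (PySem.Dict.empty : PySem.Dict String (Int × Int)))).contains kv.1 = false := by
    intro kv hkv
    rcases hc : (_ : PySem.Dict String (Int × Int)).contains kv.1 with _ | _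
    · rfl
    exfalso
    have hk := (PySem.Dict.contains_iff_mem_keys _ kv.1).1 hc
    simp only [PySem.Dict.keys, h2, List.map_append, List.map_map] at hk
    rcases List.mem_append.1 hk with hk' | hk'
    · obtain ⟨a, ha, ha1⟩ := List.mem_map.1 hk'
      exact keydisj 1 3 (by norm_num) a kv ha hkv (by simpa using ha1)
    · obtain ⟨a, ha, ha1⟩ := List.mem_map.1 hk'
      exact keydisj 2 3 (by norm_num) a kv ha hkv (by simpa using ha1)
  have h3 := PySem.Dict.items_foldl_insert_fresh
    (PySem.List.sorted ((pvDictify results).filter (fun kv => decide (pvTier kv.1 = 3)))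
      (fun kv => -|kv.2|))
    (fun kv => kv.1) (fun kv => ((3 : Int), kv.2)) _ h3pre (ndS 3)
  beta_reduce at h3
  rw [h2] at h3
  rw [h3]

-- each composite-key bucket is the per-tier sort with the tier attached afterwards
lemma bucket_eq (results : List (String × Int)) (i : Int) :
    PySem.List.sorted (((pvDictify results).map (fun kv => (kv.1, pvTier kv.1, kv.2))).filter
        (fun e => decide (e.2.1 = i))) (fun x => -|x.2.2|) =
    (PySem.List.sorted ((pvDictify results).filter (fun kv => decide (pvTier kv.1 = i)))
        (fun kv => -|kv.2|)).map (fun kv => (kv.1, i, kv.2)) := by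
  rw [List.filter_map]
  have hfil : ((pvDictify results).filter ((fun e : String × Int × Int => decide (e.2.1 = i)) ∘
      (fun kv : String × Int => (kv.1, pvTier kv.1, kv.2)))) =
      (pvDictify results).filter (fun kv => decide (pvTier kv.1 = i)) := by
    apply List.filter_congr; intro kv _; simp
  rw [hfil, ← sorted_map (fun kv : String × Int => (kv.1, pvTier kv.1, kv.2))
    (fun kv => -|kv.2|) (fun x => -|x.2.2|) (fun a => rfl)]
  apply List.map_congr_left
  intro a ha
  have hm := (PySem.List.mem_sorted _ (key := fun kv : String × Int => -|kv.2|)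
    (x := a) (rev := false)).1 ha
  have ht : pvTier a.1 = i := by simpa using (List.mem_filter.1 hm).2
  simp [ht]

-- ===== VERDICT (by name: the statement is the Claim_ definition above) =====
theorem prioritize_signals_spec : Claim_equal_prioritize_signals := by
  intro results _
  show prioritize_signals results = prioritize_signals_alt results
  rw [A_eq, B_eq,
    sorted2_eq_concat (fun x : String × Int × Int => x.2.1) (fun x => -|x.2.2|) _
      (by intro e he
          obtain ⟨kv, _, rfl⟩ := List.mem_map.1 he
          exact pvTier_cases kv.1),
    bucket_eq results 1, bucket_eq results 2, bucket_eq results 3]
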